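-- pv_equiv track=rewrite | github.com/leoozy/DensePolicy | model/codeact_agent_tree/codeact_agent_tree.py | generate_tree_leaf_ids
-- ===== SOURCE A (Python) =====
-- def generate_tree_leaf_ids(n, base):
--     sequence = []
--     for length in range(1, n + 1):
--         for i in range(base ** length):
--             base_repr = ''
--             num = i
--             while num:
--                 base_repr = str(num % base) + base_repr
--                 num //= base
--             base_repr = '0' * (length - len(base_repr)) + base_repr  # Pad with zeros to the left
--             sequence.append(
--                 tuple([int(digit) for digit in base_repr]))  # Convert the representation to a list of integers
--     return sequence
-- ===== SOURCE B (Python) =====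
-- def generate_tree_leaf_ids(n, base):
--     # Incrementally extend each tuple of the previous length by one more digit,
--     # instead of converting every integer to a padded base-`base` string.
--     sequence = []
--     tuples = [()]
--     for _ in range(1, n + 1):
--         tuples = [t + (d,) for t in tuples for d in range(base)]
--         sequence.extend(tuples)
--     return sequence
-- ===== Notes on version B (the rewrite author's own statement) =====
-- stated objective: simpler
-- what changed: B builds the length-k tuples by appending one more digit to each length-(k-1) tuple, eliminating A's per-integer base-conversion while-loop, string padding and char-to-int parsing.
-- intended difference: For n >= 1 and base >= 11 A splits each multi-digit remainder's decimal string into separate characters (the tuple for 10 wrongly holds digits 1 and 0), while B returns the true base-`base` digit tuples, the intended value. — e.g. on generate_tree_leaf_ids(1, 11): A returns [[0],[1],[2],[3],[4],[5],[6],[7],[8],[9],[1,0]], B returns [[0],[1],[2],[3],[4],[5],[6],[7],[8],[9],[10]]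
-- outside the precondition, e.g. on generate_tree_leaf_ids(2, -1): A returns [(0, 0)], B returns []
import Mathlib
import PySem

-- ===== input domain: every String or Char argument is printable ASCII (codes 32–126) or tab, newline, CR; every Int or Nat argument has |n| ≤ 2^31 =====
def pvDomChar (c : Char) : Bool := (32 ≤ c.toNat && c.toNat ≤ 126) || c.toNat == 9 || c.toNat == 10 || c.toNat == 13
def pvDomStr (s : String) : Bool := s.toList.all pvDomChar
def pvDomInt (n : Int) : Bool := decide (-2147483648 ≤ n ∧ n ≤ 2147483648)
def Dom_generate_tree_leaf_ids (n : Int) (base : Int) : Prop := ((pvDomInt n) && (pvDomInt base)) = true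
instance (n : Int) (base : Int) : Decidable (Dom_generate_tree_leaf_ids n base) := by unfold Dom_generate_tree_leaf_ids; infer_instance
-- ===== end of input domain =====

-- B replaces A's per-integer base-conversion/padding with incremental tuple extension (simpler; same cost).
-- For base ≥ 11 A's char-split digits are wrong (see D_); negative base (A raises or returns padding artifacts) is outside Pre_.


-- ===== PORT A =====
-- while num: base_repr = str(num % base) + base_repr; num //= base
-- fuel = num.natAbs bounds the iteration count on every loop state reached inside Pre_
def pvDigitsA (fuel : Nat) (num base : Int) (acc : List Char) : List Char :=
  match fuel with
  | 0 => acc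
  | f+1 =>
    if num ≠ 0 then
      pvDigitsA f (PySem.Int.floordiv num base) base (PySem.Int.toChars (PySem.Int.mod num base) ++ acc)
    else acc

def generate_tree_leaf_ids (n : Int) (base : Int) : List (List Int) :=
  (PySem.List.pyRange 1 (n+1) 1).foldl (fun sequence length =>
    (PySem.List.pyRange 0 (base ^ length.toNat) 1).foldl (fun sequence i =>
      let r0 := pvDigitsA i.natAbs i base []               -- the while loop
      let r1 := List.replicate (length.toNat - r0.length) '0' ++ r0   -- '0' * (length - len) + base_repr
      -- int(digit): inside Pre_ every digit char is a decimal digit, so int() never raises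
      sequence ++ [r1.map (fun c => (PySem.Int.ofChars? [c]).getD 0)]) sequence) []

-- ===== PORT B =====
-- tuples = [t + (d,) for t in tuples for d in range(base)]
def pvExtend (tuples : List (List Int)) (base : Int) : List (List Int) :=
  tuples.flatMap (fun t => (PySem.List.pyRange 0 base 1).map (fun d => t ++ [d]))

def generate_tree_leaf_ids_alt (n : Int) (base : Int) : List (List Int) :=
  ((PySem.List.pyRange 1 (n+1) 1).foldl
    (fun (st : List (List Int) × List (List Int)) _ =>
      let tuples := pvExtend st.2 base
      (st.1 ++ tuples, tuples)) ([], [[]])).1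

-- ===== PRECONDITION & SPEC =====
-- Pre_ excludes negative base combined with n ≥ 2: there A either raises ValueError (int('-') on the
-- sign of a negative remainder, base ≤ -2) or, for base = -1, returns accidental zero-padding tuples
-- of its empty string representation, which B (an empty digit range) does not reproduce.
def Pre_generate_tree_leaf_ids (n : Int) (base : Int) : Prop := 0 ≤ base ∨ n ≤ 1
instance (n : Int) (base : Int) : Decidable (Pre_generate_tree_leaf_ids n base) := by unfold Pre_generate_tree_leaf_ids; infer_instance
def pvWitness_generate_tree_leaf_ids : Int × Int := (3, 2)

-- For n ≥ 1 and base ≥ 11 A splits each multi-digit remainder's decimal string into separate characters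
-- (the tuple for 10 wrongly holds digits 1 and 0), while B returns the true base-`base` digit tuples, the intended value.
def D_generate_tree_leaf_ids (n : Int) (base : Int) : Prop := 1 ≤ n ∧ 11 ≤ base
instance (n : Int) (base : Int) : Decidable (D_generate_tree_leaf_ids n base) := by unfold D_generate_tree_leaf_ids; infer_instance

def Spec_generate_tree_leaf_ids (n : Int) (base : Int) (out : List (List Int)) : Prop := ¬ D_generate_tree_leaf_ids n base → out = generate_tree_leaf_ids_alt n base
instance (n : Int) (base : Int) (out : List (List Int)) : Decidable (Spec_generate_tree_leaf_ids n base out) := by unfold Spec_generate_tree_leaf_ids; infer_instance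

def pvDiffWitness_generate_tree_leaf_ids : Int × Int := (1, 11)
def pvDiffWitnessOut_generate_tree_leaf_ids : (List (List Int)) × (List (List Int)) :=
  ([[0],[1],[2],[3],[4],[5],[6],[7],[8],[9],[1,0]], [[0],[1],[2],[3],[4],[5],[6],[7],[8],[9],[10]])

-- ===== CLAIM (what is proved, stated in full; the proofs are below) =====
def Claim_unchanged_generate_tree_leaf_ids : Prop := ∀ (n : Int) (base : Int), Dom_generate_tree_leaf_ids n base → Pre_generate_tree_leaf_ids n base → Spec_generate_tree_leaf_ids n base (generate_tree_leaf_ids n base)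
def Claim_changed_generate_tree_leaf_ids : Prop := Dom_generate_tree_leaf_ids (pvDiffWitness_generate_tree_leaf_ids.1) (pvDiffWitness_generate_tree_leaf_ids.2) ∧ Pre_generate_tree_leaf_ids (pvDiffWitness_generate_tree_leaf_ids.1) (pvDiffWitness_generate_tree_leaf_ids.2) ∧ D_generate_tree_leaf_ids (pvDiffWitness_generate_tree_leaf_ids.1) (pvDiffWitness_generate_tree_leaf_ids.2) ∧ generate_tree_leaf_ids (pvDiffWitness_generate_tree_leaf_ids.1) (pvDiffWitness_generate_tree_leaf_ids.2) = pvDiffWitnessOut_generate_tree_leaf_ids.1 ∧ generate_tree_leaf_ids_alt (pvDiffWitness_generate_tree_leaf_ids.1) (pvDiffWitness_generate_tree_leaf_ids.2) = pvDiffWitnessOut_generate_tree_leaf_ids.2 ∧ pvDiffWitnessOut_generate_tree_leaf_ids.1 ≠ pvDiffWitnessOut_generate_tree_leaf_ids.2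
def Claim_exact_generate_tree_leaf_ids : Prop := ∀ (n : Int) (base : Int), Dom_generate_tree_leaf_ids n base → Pre_generate_tree_leaf_ids n base → D_generate_tree_leaf_ids n base → generate_tree_leaf_ids n base ≠ generate_tree_leaf_ids_alt n base

-- ===== LEMMAS AND PROOFS =====

-- the digit character of r (r < 10) and int() of it
def pvDigitChar (r : Nat) : Char := Char.ofNat (48 + r)
def pvVal (c : Char) : Int := (PySem.Int.ofChars? [c]).getD 0

-- the decimal-character string A's while loop builds for a nonnegative number (fueled model)
def pvCharsF (fuel : Nat) (b : Nat) (i : Nat) : List Char :=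
  match fuel, i with
  | 0, _ => []
  | _+1, 0 => []
  | f+1, i+1 => pvCharsF f b ((i+1) / b) ++ [pvDigitChar ((i+1) % b)]

def pvChars (b i : Nat) : List Char := pvCharsF i b i

-- the length-L big-endian digit expansion of i in base b
def pvExpandN (b : Nat) : Nat → Nat → List Int
  | 0, _ => []
  | L+1, i => pvExpandN b L (i / b) ++ [((i % b : Nat) : Int)]

def pvBlock (b : Nat) (L : Nat) : List (List Int) := (List.range (b^L)).map (pvExpandN b L)
def pvSeqs (b : Nat) (k : Nat) : List (List Int) := (List.range k).flatMap (fun j => pvBlock b (j+1))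

-- the tuple A appends for loop variables `length` (= L) and `i`
def pvAf (base : Int) (L : Nat) (i : Int) : List Int :=
  (List.replicate (L - (pvDigitsA i.natAbs i base []).length) '0' ++ pvDigitsA i.natAbs i base []).map
    (fun c => (PySem.Int.ofChars? [c]).getD 0)

theorem pvCharsF_enough (b : Nat) (hb : 2 ≤ b) : ∀ i fuel, i ≤ fuel → pvCharsF fuel b i = pvChars b i := by
  intro i
  induction i using Nat.strong_induction_on with
  | _ i IH =>
    intro fuel hf
    match i, fuel with
    | 0, 0 => rfl
    | 0, f+1 => rfl
    | i+1, f+1 =>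
      have hdiv : (i+1) / b < i + 1 := Nat.div_lt_self (Nat.succ_pos i) hb
      show pvCharsF f b ((i+1)/b) ++ _ = pvChars b (i+1)
      rw [IH ((i+1)/b) hdiv f (by omega)]
      show _ = pvCharsF (i+1) b (i+1)
      show _ = pvCharsF i b ((i+1)/b) ++ _
      rw [IH ((i+1)/b) hdiv i (by omega)]

theorem pvChars_succ (b : Nat) (hb : 2 ≤ b) (i : Nat) (hi : 1 ≤ i) :
    pvChars b i = pvChars b (i / b) ++ [pvDigitChar (i % b)] := by
  obtain ⟨j, rfl⟩ : ∃ j, i = j + 1 := ⟨i - 1, by omega⟩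
  have hdiv : (j+1) / b < j + 1 := Nat.div_lt_self (Nat.succ_pos j) hb
  show pvCharsF (j+1) b (j+1) = _
  show pvCharsF j b ((j+1)/b) ++ _ = _
  rw [pvCharsF_enough b hb ((j+1)/b) j (by omega)]

theorem pvToChars_digit (r : Nat) (h : r < 10) : PySem.Int.toChars (r : Int) = [pvDigitChar r] := by
  interval_cases r <;> rfl

theorem pvVal_digit (r : Nat) (h : r < 10) : pvVal (pvDigitChar r) = (r : Int) := by
  interval_cases r <;> rfl

theorem pvDigitsA_eq (b : Nat) (hb2 : 2 ≤ b) (hb10 : b ≤ 10) :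
    ∀ i fuel acc, i ≤ fuel → pvDigitsA fuel (i : Int) (b : Int) acc = pvChars b i ++ acc := by
  intro i
  induction i using Nat.strong_induction_on with
  | _ i IH =>
    intro fuel acc hf
    match i, fuel with
    | 0, 0 => rfl
    | 0, f+1 => simp [pvDigitsA, pvChars, pvCharsF]
    | i+1, f+1 =>
      have hne : ((i+1 : Nat) : Int) ≠ 0 := by exact_mod_cast Nat.succ_ne_zero i
      have hdiv : (i+1) / b < i + 1 := Nat.div_lt_self (Nat.succ_pos i) hb2
      have hmod : (i+1) % b < 10 := lt_of_lt_of_le (Nat.mod_lt _ (by omega)) hb10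
      show (if ((i+1:Nat):Int) ≠ 0 then _ else _) = _
      rw [if_pos hne, PySem.Int.floordiv_natCast, PySem.Int.mod_natCast,
        pvToChars_digit _ hmod, IH ((i+1)/b) hdiv f _ (by omega),
        pvChars_succ b hb2 (i+1) (by omega)]
      simp

theorem pvExpandN_zero (b L : Nat) : pvExpandN b L 0 = List.replicate L 0 := by
  induction L with
  | zero => rfl
  | succ L IH => simp [pvExpandN, Nat.zero_div, Nat.zero_mod, IH, ← List.replicate_succ']

theorem pvPad_expand (b : Nat) (hb1 : 1 ≤ b) (hb10 : b ≤ 10) :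
    ∀ L i, i < b ^ L →
      (List.replicate (L - (pvChars b i).length) '0' ++ pvChars b i).map pvVal = pvExpandN b L i := by
  intro L
  induction L with
  | zero =>
    intro i hi
    have h0 : i = 0 := by simpa using hi
    subst h0
    rfl
  | succ L IH =>
    intro i hi
    rcases Nat.eq_zero_or_pos i with rfl | hpos
    · have h0 : pvChars b 0 = [] := rfl
      rw [h0, pvExpandN, Nat.zero_div, Nat.zero_mod, pvExpandN_zero]
      simp [← List.replicate_succ']
      rfl
    · have hb2 : 2 ≤ b := by
        rcases Nat.lt_or_ge b 2 with h | h
        · exfalso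
          have hb1' : b = 1 := by omega
          subst hb1'
          simp at hi
          omega
        · exact h
      have hdivlt : i / b < b ^ L := by
        rw [Nat.div_lt_iff_lt_mul (by omega)]
        calc i < b ^ (L+1) := hi
          _ = b ^ L * b := pow_succ b L
      have hmod : i % b < 10 := lt_of_lt_of_le (Nat.mod_lt _ (by omega)) hb10
      rw [pvChars_succ b hb2 i hpos]
      have hlen : L + 1 - (pvChars b (i/b) ++ [pvDigitChar (i % b)]).length
          = L - (pvChars b (i/b)).length := by simp
      rw [hlen, ← List.append_assoc, pvExpandN]
      simp only [List.map_append, IH (i/b) hdivlt, List.map_cons, List.map_nil,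
        pvVal_digit _ hmod]

theorem pvExpandN_step (b L q r : Nat) (hb : 0 < b) (hr : r < b) :
    pvExpandN b (L+1) (q * b + r) = pvExpandN b L q ++ [(r:Int)] := by
  rw [show pvExpandN b (L+1) (q * b + r)
      = pvExpandN b L ((q * b + r) / b) ++ [(((q * b + r) % b : Nat) : Int)] from rfl]
  have h1 : (q * b + r) / b = q := by
    rw [Nat.add_comm, Nat.add_mul_div_right r q hb, Nat.div_eq_of_lt hr, Nat.zero_add]
  have h2 : (q * b + r) % b = r := by
    rw [Nat.add_comm, Nat.add_mul_mod_self_right, Nat.mod_eq_of_lt hr]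
  rw [h1, h2]

theorem pvRange_mul_flatMap (b : Nat) :
    ∀ m, List.range (m * b) = (List.range m).flatMap (fun q => (List.range b).map (fun r => q * b + r)) := by
  intro m
  induction m with
  | zero => simp
  | succ m IH =>
    have h1 : (m + 1) * b = m * b + b := by ring
    rw [h1, List.range_add, List.range_succ, List.flatMap_append, ← IH]
    simp

theorem pvExtend_block (b L : Nat) : pvExtend (pvBlock b L) (b : Int) = pvBlock b (L + 1) := by
  rcases Nat.eq_zero_or_pos b with rfl | hb
  · simp [pvExtend, pvBlock, PySem.List.pyRange_one_eq_nil (le_refl (0:Int)),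
      Nat.zero_pow (by omega : 0 < L + 1)]
  · unfold pvExtend pvBlock
    rw [PySem.List.pyRange_zero_nat, pow_succ, pvRange_mul_flatMap]
    rw [List.flatMap_map, List.map_flatMap]
    refine congrArg (fun f => List.flatMap f (List.range (b^L))) ?_
    funext q
    show ((List.range b).map (fun k : Nat => (k:Int))).map (fun d => pvExpandN b L q ++ [d])
        = ((List.range b).map (fun r => q * b + r)).map (pvExpandN b (L+1))
    rw [List.map_map, List.map_map]
    apply List.map_congr_left
    intro r hrm
    have hr : r < b := List.mem_range.mp hrm
    show pvExpandN b L q ++ [(r:Int)] = pvExpandN b (L+1) (q * b + r)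
    exact (pvExpandN_step b L q r hb hr).symm

theorem pvFoldl_append_map {α β : Type} (f : α → β) :
    ∀ (l : List α) (s : List β), l.foldl (fun acc x => acc ++ [f x]) s = s ++ l.map f := by
  intro l
  induction l with
  | nil => intro s; simp
  | cons x xs IH => intro s; simp [List.foldl_cons, IH]

theorem pvFoldl_append_flat {α β : Type} (g : α → List β) :
    ∀ (l : List α) (s : List β), l.foldl (fun acc x => acc ++ g x) s = s ++ l.flatMap g := by
  intro l
  induction l with
  | nil => intro s; simp
  | cons x xs IH => intro s; simp [List.foldl_cons, IH]

theorem pvA_unfold (n base : Int) : generate_tree_leaf_ids n base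
    = (PySem.List.pyRange 1 (n+1) 1).flatMap
        (fun len => (PySem.List.pyRange 0 (base ^ len.toNat) 1).map (pvAf base len.toNat)) := by
  show (PySem.List.pyRange 1 (n+1) 1).foldl
      (fun sequence len => (PySem.List.pyRange 0 (base ^ len.toNat) 1).foldl
        (fun sequence i => sequence ++ [pvAf base len.toNat i]) sequence) [] = _
  have hfun : (fun (sequence : List (List Int)) (len : Int) =>
        (PySem.List.pyRange 0 (base ^ len.toNat) 1).foldl
          (fun sequence i => sequence ++ [pvAf base len.toNat i]) sequence)
      = fun sequence len => sequence ++ (PySem.List.pyRange 0 (base ^ len.toNat) 1).map (pvAf base len.toNat) := by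
    funext s len
    exact pvFoldl_append_map _ _ _
  rw [hfun, pvFoldl_append_flat]
  simp

theorem pvAmap_block (b : Nat) (hb10 : b ≤ 10) (L : Nat) (hL : 1 ≤ L) :
    (PySem.List.pyRange 0 ((b:Int) ^ L) 1).map (pvAf (b:Int) L) = pvBlock b L := by
  rcases Nat.eq_zero_or_pos b with rfl | hb1
  · have h0 : ((0:Nat):Int) ^ L = 0 := by
      simp [zero_pow (by omega : L ≠ 0)]
    rw [h0, PySem.List.pyRange_one_eq_nil (le_refl (0:Int))]
    simp [pvBlock, Nat.zero_pow (by omega : 0 < L)]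
  · have hcast : ((b:Int)) ^ L = ((b ^ L : Nat) : Int) := by push_cast; ring
    rw [hcast, PySem.List.pyRange_zero_nat, List.map_map]
    unfold pvBlock
    apply List.map_congr_left
    intro i hi
    have hi' : i < b ^ L := List.mem_range.mp hi
    show pvAf (b:Int) L (i:Int) = _
    unfold pvAf
    rw [Int.natAbs_natCast]
    have hdig : pvDigitsA i (i:Int) (b:Int) [] = pvChars b i := by
      rcases Nat.lt_or_ge b 2 with h | h
      · have hb1' : b = 1 := by omega
        subst hb1'
        have h0 : i = 0 := by simpa using hi'
        subst h0
        rfl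
      · simpa using pvDigitsA_eq b h hb10 i i [] (le_refl i)
    rw [hdig]
    exact pvPad_expand b hb1 hb10 L i hi'

theorem pvA_flat (b : Nat) (hb10 : b ≤ 10) : ∀ k : Nat,
    (PySem.List.pyRange 1 ((k:Int)+1) 1).flatMap
      (fun len => (PySem.List.pyRange 0 ((b:Int) ^ len.toNat) 1).map (pvAf (b:Int) len.toNat))
    = pvSeqs b k := by
  intro k
  induction k with
  | zero =>
    rw [PySem.List.pyRange_one_eq_nil (by norm_num)]
    rfl
  | succ k IH =>
    have hcast : ((k+1:Nat):Int) + 1 = ((k:Int) + 1) + 1 := by push_cast; ring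
    rw [hcast, PySem.List.pyRange_one_succ_right (by omega), List.flatMap_append, IH]
    have hlen : ((k:Int)+1).toNat = k + 1 := by omega
    simp only [List.flatMap_cons, List.flatMap_nil, List.append_nil, hlen]
    rw [pvAmap_block b hb10 (k+1) (by omega)]
    show _ = pvSeqs b (k+1)
    unfold pvSeqs
    rw [List.range_succ, List.flatMap_append]
    simp

theorem pvA_eq (n : Int) (base : Int) (h0 : 0 ≤ base) (h10 : base ≤ 10) :
    generate_tree_leaf_ids n base = pvSeqs base.toNat n.toNat := by
  rw [pvA_unfold]
  obtain ⟨b, rfl⟩ : ∃ b:Nat, base = (b:Int) := ⟨base.toNat, (Int.toNat_of_nonneg h0).symm⟩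
  have hb10 : b ≤ 10 := by exact_mod_cast h10
  rcases (show n ≤ 0 ∨ 0 < n from by omega) with hn | hn
  · rw [PySem.List.pyRange_one_eq_nil (by omega)]
    have h0' : n.toNat = 0 := by omega
    rw [h0']
    rfl
  · obtain ⟨k, rfl⟩ : ∃ k:Nat, n = (k:Int) := ⟨n.toNat, (Int.toNat_of_nonneg (by omega)).symm⟩
    have hk : ((k:Int)).toNat = k := by omega
    rw [hk]
    exact pvA_flat b hb10 k

theorem pvB_fold (b : Nat) : ∀ k : Nat,
    (PySem.List.pyRange 1 ((k:Int)+1) 1).foldl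
      (fun (st : List (List Int) × List (List Int)) _ =>
        let tuples := pvExtend st.2 (b:Int)
        (st.1 ++ tuples, tuples)) ([], [[]])
    = (pvSeqs b k, pvBlock b k) := by
  intro k
  induction k with
  | zero =>
    rw [PySem.List.pyRange_one_eq_nil (by norm_num)]
    simp [pvSeqs, pvBlock, pow_zero]
    rfl
  | succ k IH =>
    have hcast : ((k+1:Nat):Int) + 1 = ((k:Int) + 1) + 1 := by push_cast; ring
    rw [hcast, PySem.List.pyRange_one_succ_right (by omega), List.foldl_append, IH]
    show (pvSeqs b k ++ pvExtend (pvBlock b k) (b:Int), pvExtend (pvBlock b k) (b:Int)) = _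
    rw [pvExtend_block]
    show _ = (pvSeqs b (k+1), _)
    unfold pvSeqs
    rw [List.range_succ, List.flatMap_append]
    simp

theorem pvB_eq (n : Int) (base : Int) (h0 : 0 ≤ base) :
    generate_tree_leaf_ids_alt n base = pvSeqs base.toNat n.toNat := by
  obtain ⟨b, rfl⟩ : ∃ b:Nat, base = (b:Int) := ⟨base.toNat, (Int.toNat_of_nonneg h0).symm⟩
  rcases (show n ≤ 0 ∨ 0 < n from by omega) with hn | hn
  · unfold generate_tree_leaf_ids_alt
    rw [PySem.List.pyRange_one_eq_nil (by omega)]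
    have h0' : n.toNat = 0 := by omega
    rw [h0']
    rfl
  · obtain ⟨k, rfl⟩ : ∃ k:Nat, n = (k:Int) := ⟨n.toNat, (Int.toNat_of_nonneg (by omega)).symm⟩
    have hk : ((k:Int)).toNat = k := by omega
    unfold generate_tree_leaf_ids_alt
    rw [hk, pvB_fold b k]
    rfl

theorem pvNeg (n base : Int) (hb : base < 0) (hn : n ≤ 1) :
    generate_tree_leaf_ids n base = [] ∧ generate_tree_leaf_ids_alt n base = [] := by
  rcases (show n ≤ 0 ∨ n = 1 from by omega) with h | rfl
  · constructor
    · unfold generate_tree_leaf_ids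
      rw [PySem.List.pyRange_one_eq_nil (by omega)]
      rfl
    · unfold generate_tree_leaf_ids_alt
      rw [PySem.List.pyRange_one_eq_nil (by omega)]
      rfl
  · have h12 : PySem.List.pyRange 1 (1+1) 1 = [1] := PySem.List.pyRange_one_singleton 1
    have hnilB : PySem.List.pyRange 0 base 1 = [] := PySem.List.pyRange_one_eq_nil (by omega)
    have hnil : PySem.List.pyRange 0 (base ^ ((1:Int)).toNat) 1 = [] := by
      have hpow : base ^ ((1:Int)).toNat = base := by norm_num
      rw [hpow]
      exact hnilB
    constructor
    · rw [pvA_unfold, h12]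
      simp [hnil, hnilB]
    · unfold generate_tree_leaf_ids_alt
      rw [h12]
      simp [List.foldl_cons, List.foldl_nil, pvExtend, hnilB]

theorem pvAf_ten (base : Int) (hb : 11 ≤ base) : pvAf base 1 10 = [1, 0] := by
  have hm : PySem.Int.mod 10 base = 10 := by
    rw [PySem.Int.mod_eq_emod_of_pos (by omega)]
    exact Int.emod_eq_of_lt (by norm_num) (by omega)
  have hd : PySem.Int.floordiv 10 base = 0 := by
    rw [PySem.Int.floordiv_eq_ediv_of_pos (by omega)]
    exact Int.ediv_eq_zero_of_lt (by norm_num) (by omega)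
  have h1 : pvDigitsA (10:Int).natAbs 10 base [] = ['1','0'] := by
    show (if (10:Int) ≠ 0 then
        pvDigitsA 9 (PySem.Int.floordiv 10 base) base (PySem.Int.toChars (PySem.Int.mod 10 base) ++ []) else []) = _
    rw [if_pos (by norm_num), hm, hd]
    rfl
  unfold pvAf
  rw [h1]
  rfl

theorem pvA_ten (n base : Int) (hn : 1 ≤ n) (hb : 11 ≤ base) :
    (generate_tree_leaf_ids n base)[10]? = some [1, 0] := by
  obtain ⟨b, rfl⟩ : ∃ b:Nat, base = (b:Int) := ⟨base.toNat, (Int.toNat_of_nonneg (by omega)).symm⟩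
  have hb' : 11 ≤ b := by exact_mod_cast hb
  rw [pvA_unfold, PySem.List.pyRange_one_cons (by omega : (1:Int) < n+1), List.flatMap_cons]
  have hpow : ((b:Int)) ^ ((1:Int)).toNat = ((b:Nat):Int) := by norm_num
  have hlen : ((PySem.List.pyRange 0 ((b:Int) ^ ((1:Int)).toNat) 1).map (pvAf (b:Int) ((1:Int)).toNat)).length = b := by
    rw [hpow]
    simp [PySem.List.length_pyRange_one]
  rw [List.getElem?_append_left (by rw [hlen]; omega), hpow,
    PySem.List.getElem?_map_pyRange_zero (pvAf (b:Int) ((1:Int)).toNat) b 10 (by omega)]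
  have h10 : ((10:Nat):Int) = (10:Int) := by norm_num
  rw [h10]
  have hAf : pvAf (b:Int) ((1:Int)).toNat 10 = [1, 0] := pvAf_ten (b:Int) hb
  rw [hAf]

theorem pvB_ten (n base : Int) (hn : 1 ≤ n) (hb : 11 ≤ base) :
    (generate_tree_leaf_ids_alt n base)[10]? = some [10] := by
  rw [pvB_eq n base (by omega)]
  obtain ⟨m, hm⟩ : ∃ m, n.toNat = m + 1 := ⟨n.toNat - 1, by omega⟩
  rw [hm]
  have hb' : 11 ≤ base.toNat := by omega
  unfold pvSeqs
  rw [List.range_succ_eq_map, List.flatMap_cons]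
  have hlen : (pvBlock base.toNat (0+1)).length = base.toNat := by
    simp [pvBlock, pow_one]
  rw [List.getElem?_append_left (by rw [hlen]; omega)]
  unfold pvBlock
  rw [List.getElem?_map, List.getElem?_range (by simp [pow_one]; omega)]
  show some (pvExpandN base.toNat (0+1) 10) = some [10]
  have hstep : pvExpandN base.toNat (0+1) 10 = [((10 % base.toNat : Nat) : Int)] := rfl
  rw [hstep, Nat.mod_eq_of_lt (by omega)]
  norm_num

-- ===== VERDICT (by name: the statement is the Claim_ definition above) =====
theorem generate_tree_leaf_ids_spec : Claim_unchanged_generate_tree_leaf_ids := by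
  intro n base _hDom hPre hD
  rcases (show 0 ≤ base ∨ base < 0 from by omega) with h0 | hneg
  · have hcase : n ≤ 0 ∨ base ≤ 10 := by
      by_contra h
      push_neg at h
      exact hD ⟨by omega, by omega⟩
    rcases hcase with hn | h10
    · unfold generate_tree_leaf_ids generate_tree_leaf_ids_alt
      rw [PySem.List.pyRange_one_eq_nil (by omega)]
      rfl
    · rw [pvA_eq n base h0 h10, pvB_eq n base h0]
  · have hn1 : n ≤ 1 := by
      rcases hPre with h | h
      · omega
      · exact h
    obtain ⟨hA, hB⟩ := pvNeg n base hneg hn1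
    rw [hA, hB]

theorem generate_tree_leaf_ids_changed : Claim_changed_generate_tree_leaf_ids := by
  unfold Claim_changed_generate_tree_leaf_ids; decide

theorem generate_tree_leaf_ids_tight : Claim_exact_generate_tree_leaf_ids := by
  intro n base _hDom _hPre hD h
  obtain ⟨hn, hb⟩ := hD
  have hA := pvA_ten n base hn hb
  have hB := pvB_ten n base hn hb
  rw [h, hB] at hA
  simp at hA
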